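-- pv_equiv track=rewrite | github.com/lunagferreira/AoC | day6/main.py | parse_problem_part2
-- ===== SOURCE A (Python) =====
-- def parse_problem_part2(grid, col_start, col_end):
--     """From a given column range, extract list of numbers and operation,
--     where each number is written vertically in a single column."""
--     num_rows = len(grid)
--     operation_row = num_rows - 1
--
--     # Find the operation in the last row in this column range
--     operation_segment = grid[operation_row][col_start:col_end]
--     operation = None
--     if "+" in operation_segment:
--         operation = "+"
--     else:
--         operation = "*"
--
--     # Collect numbers from all rows except the last
--     numbers = []
--     # For each column in this problem, read digits top-to-bottom
--     for col in range(col_start, col_end):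
--         digits = []
--         for row in range(operation_row):
--             ch = grid[row][col]
--             if ch.isdigit():
--                 digits.append(ch)
--
--         if digits:
--             # Each column corresponds to exactly one number
--             num = int("".join(digits))
--             numbers.append(num)
--
--     return numbers, operation
-- ===== SOURCE B (Python) =====
-- def parse_problem_part2(grid, col_start, col_end):
--     """Single row-major pass: keep one string accumulator per column, then
--     convert the non-empty accumulators to numbers."""
--     num_rows = len(grid)
--     operation_row = num_rows - 1
--     operation = "+" if "+" in grid[operation_row][col_start:col_end] else "*"
--     cols_idx = range(col_start, col_end)
--     acc = ["" for _ in cols_idx]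
--     for row in range(operation_row):
--         line = grid[row]
--         new_acc = []
--         for col, s in zip(cols_idx, acc):
--             ch = line[col]
--             new_acc.append(s + ch if ch.isdigit() else s)
--         acc = new_acc
--     return [int(s) for s in acc if s], operation
-- ===== Notes on version B (the rewrite author's own statement) =====
-- stated objective: alternative
-- what changed: Replaced A's column-by-column scan (inner loop over rows per column) by a single row-major pass that maintains one string accumulator per column and converts the non-empty accumulators afterwards.
import Mathlib
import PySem

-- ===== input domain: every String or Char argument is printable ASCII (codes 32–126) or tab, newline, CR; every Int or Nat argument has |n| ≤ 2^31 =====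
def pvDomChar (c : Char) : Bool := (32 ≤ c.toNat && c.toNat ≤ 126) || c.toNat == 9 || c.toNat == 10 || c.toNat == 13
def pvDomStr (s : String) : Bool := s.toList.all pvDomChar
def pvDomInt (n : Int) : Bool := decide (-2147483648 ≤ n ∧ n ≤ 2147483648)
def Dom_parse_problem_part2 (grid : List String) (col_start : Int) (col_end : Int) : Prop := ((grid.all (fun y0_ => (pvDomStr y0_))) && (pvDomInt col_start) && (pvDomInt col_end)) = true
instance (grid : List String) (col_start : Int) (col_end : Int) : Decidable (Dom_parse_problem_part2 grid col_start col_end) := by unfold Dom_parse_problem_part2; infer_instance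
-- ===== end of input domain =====

-- B replaces A's column-by-column scan by one row-major pass that keeps a per-column
-- string accumulator (objective: alternative decomposition, same asymptotic cost).

-- ===== PORT A =====
-- Literal port of A: for each column, scan all rows collecting its digit characters.
-- grid[row][col] is ported as pyGetD … ' ' : Python raises IndexError where it is out of
-- range, so Pre_ keeps it in range; int("".join(digits)) on a nonempty all-digit string
-- cannot raise, ported as (ofChars? …).getD 0.
def parse_problem_part2 (grid : List String) (col_start : Int) (col_end : Int) : List Int × String :=
  let num_rows : Int := grid.length
  let operation_row : Int := num_rows - 1
  let operation_segment : List Char :=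
    PySem.List.slice (PySem.List.pyGetD grid operation_row "").toList (some col_start) (some col_end)
  let operation : String := if PySem.Chars.isIn ['+'] operation_segment then "+" else "*"
  let numbers : List Int := (PySem.List.pyRange col_start col_end 1).foldl (fun numbers col =>
    let digits : List Char := (PySem.List.pyRange 0 operation_row 1).foldl (fun digits row =>
      let ch : Char := PySem.List.pyGetD (PySem.List.pyGetD grid row "").toList col ' '
      if PySem.Chars.isdigit ch then digits ++ [ch] else digits) []
    if !digits.isEmpty then numbers ++ [(PySem.Int.ofChars? digits).getD 0] else numbers) []
  (numbers, operation)

-- ===== PORT B =====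
-- Literal port of B (Source B): one accumulator per column, one pass over the rows,
-- then convert the non-empty accumulators. Same pyGetD/ofChars? conventions as A's port.
def parse_problem_part2_alt (grid : List String) (col_start : Int) (col_end : Int) : List Int × String :=
  let num_rows : Int := grid.length
  let operation_row : Int := num_rows - 1
  let operation : String :=
    if PySem.Chars.isIn ['+']
        (PySem.List.slice (PySem.List.pyGetD grid operation_row "").toList (some col_start) (some col_end))
    then "+" else "*"
  let cols_idx : List Int := PySem.List.pyRange col_start col_end 1
  let acc0 : List (List Char) := cols_idx.map (fun _ => [])
  let acc : List (List Char) := (PySem.List.pyRange 0 operation_row 1).foldl (fun acc row =>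
    let line : List Char := (PySem.List.pyGetD grid row "").toList
    (cols_idx.zip acc).map (fun p =>
      let ch : Char := PySem.List.pyGetD line p.1 ' '
      if PySem.Chars.isdigit ch then p.2 ++ [ch] else p.2)) acc0
  ((acc.filter (fun s => !s.isEmpty)).map (fun s => (PySem.Int.ofChars? s).getD 0), operation)

-- ===== PRECONDITION & SPEC =====
-- Pre_ excludes exactly the inputs where Python A raises IndexError: the empty grid
-- (grid[-1]) and any in-range row whose string does not cover some requested column.
def Pre_parse_problem_part2 (grid : List String) (col_start : Int) (col_end : Int) : Prop :=
  grid ≠ [] ∧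
  (col_start < col_end → ∀ s ∈ grid.dropLast,
    -(s.toList.length : Int) ≤ col_start ∧ col_end - 1 < (s.toList.length : Int))
instance (grid : List String) (col_start : Int) (col_end : Int) : Decidable (Pre_parse_problem_part2 grid col_start col_end) := by unfold Pre_parse_problem_part2; infer_instance
def pvWitness_parse_problem_part2 : List String × Int × Int := (["12", "34", "+ "], 0, 2)
def Spec_parse_problem_part2 (grid : List String) (col_start : Int) (col_end : Int) (out : List Int × String) : Prop := out = parse_problem_part2_alt grid col_start col_end
instance (grid : List String) (col_start : Int) (col_end : Int) (out : List Int × String) : Decidable (Spec_parse_problem_part2 grid col_start col_end out) := by unfold Spec_parse_problem_part2; infer_instance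

-- ===== CLAIM (what is proved, stated in full; the proofs are below) =====
def Claim_equal_parse_problem_part2 : Prop := ∀ (grid : List String) (col_start : Int) (col_end : Int), Dom_parse_problem_part2 grid col_start col_end → Pre_parse_problem_part2 grid col_start col_end → Spec_parse_problem_part2 grid col_start col_end (parse_problem_part2 grid col_start col_end)

-- ===== LEMMAS AND PROOFS =====

-- Mapping the zip of a list with a map of itself is a map over the list.
theorem zip_map_self_map {α β γ : Type} (l : List α) (g : α → β) (f : α × β → γ) :
    (l.zip (l.map g)).map f = l.map (fun a => f (a, g a)) := by
  induction l with
  | nil => rfl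
  | cons x xs ih => simp [ih]

-- Loop interchange: folding the rows over a per-column map equals mapping each column
-- to its own fold over the rows.
theorem fold_rows_map_cols {α β : Type} (rows : List β) (cols : List α)
    (step : β → α → List Char → List Char) (g : α → List Char) :
    rows.foldl (fun acc row => (cols.zip acc).map (fun p => step row p.1 p.2)) (cols.map g)
      = cols.map (fun c => rows.foldl (fun d row => step row c d) (g c)) := by
  induction rows generalizing g with
  | nil => rfl
  | cons r rs ih =>
      simp only [List.foldl_cons]
      rw [zip_map_self_map, ih (fun c => step r c (g c))]

-- ===== VERDICT (by name: the statement is the Claim_ definition above) =====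
theorem parse_problem_part2_spec : Claim_equal_parse_problem_part2 := by
  intro grid col_start col_end _ _
  unfold Spec_parse_problem_part2
  simp only [parse_problem_part2, parse_problem_part2_alt]
  rw [fold_rows_map_cols _ _
        (fun row c d =>
          if PySem.Chars.isdigit (PySem.List.pyGetD (PySem.List.pyGetD grid row "").toList c ' ')
          then d ++ [PySem.List.pyGetD (PySem.List.pyGetD grid row "").toList c ' '] else d)
        (fun _ => []),
      PySem.List.foldl_append_if, List.filter_map]
  simp [Function.comp_def]
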